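-- pv_equiv track=rewrite | github.com/cxiangood/So-Free-Knowledge | token_classify/classify.py | _build_keyword_contexts
-- ===== SOURCE A (Python) =====
-- from typing import Any, Dict, List, Optional, Sequence
--
-- def _build_keyword_contexts(instances: List[Dict[str, object]], keywords: List[str]) -> Dict[str, List[str]]:
--     grouped: Dict[str, List[str]] = {kw: [] for kw in keywords}
--     for item in instances:
--         kw = str(item.get("keyword", ""))
--         if kw not in grouped:
--             continue
--         ctx = str(item.get("context", "")).strip()
--         if ctx:
--             grouped[kw].append(ctx)
--     return grouped
-- ===== SOURCE B (Python) =====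
-- from typing import Dict, List
--
-- def _build_keyword_contexts(instances: List[Dict[str, object]], keywords: List[str]) -> Dict[str, List[str]]:
--     result: Dict[str, List[str]] = {}
--     for kw in keywords:
--         result[kw] = [
--             str(item.get("context", "")).strip()
--             for item in instances
--             if str(item.get("keyword", "")) == kw and str(item.get("context", "")).strip()
--         ]
--     return result
-- ===== Notes on version B (the rewrite author's own statement) =====
-- stated objective: alternative
-- what changed: B drops A's pre-initialised dict-of-lists with a single indexed pass over instances (membership test + append) and instead assigns, for each keyword in order, the list comprehension of stripped non-empty contexts collected by rescanning all instances.
import Mathlib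
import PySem

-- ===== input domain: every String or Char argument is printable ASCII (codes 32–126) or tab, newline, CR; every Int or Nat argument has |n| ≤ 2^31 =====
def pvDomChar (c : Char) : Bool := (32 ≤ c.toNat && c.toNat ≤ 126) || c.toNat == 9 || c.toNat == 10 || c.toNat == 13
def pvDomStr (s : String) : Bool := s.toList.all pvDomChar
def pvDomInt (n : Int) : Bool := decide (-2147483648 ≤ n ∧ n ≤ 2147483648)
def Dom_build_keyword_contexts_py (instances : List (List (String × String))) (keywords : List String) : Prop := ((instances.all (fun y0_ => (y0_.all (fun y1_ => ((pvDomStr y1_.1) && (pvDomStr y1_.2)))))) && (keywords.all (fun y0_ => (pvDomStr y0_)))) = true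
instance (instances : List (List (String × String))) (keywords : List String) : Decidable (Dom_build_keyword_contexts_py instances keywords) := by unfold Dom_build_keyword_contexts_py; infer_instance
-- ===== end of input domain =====

-- B replaces A's single indexed pass (dict of lists, membership test, append) by one
-- assignment per keyword built from a rescan of the instances — a different decomposition
-- of similar size ("alternative", not faster).

-- ===== PORT A =====
-- A: grouped = {kw: [] for kw in keywords}; one pass over instances appending stripped
-- non-empty contexts to grouped[kw] when kw is a key.
def build_keyword_contexts_py (instances : List (List (String × String))) (keywords : List String) : List (String × List String) :=
  let grouped0 : PySem.Dict String (List String) :=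
    keywords.foldl (fun d kw => d.insert kw []) PySem.Dict.empty
  let grouped : PySem.Dict String (List String) :=
    instances.foldl (fun g item =>
      let kw := (PySem.Dict.mk item).getD "keyword" ""
      if g.contains kw then
        let ctx := PySem.Str.strip ((PySem.Dict.mk item).getD "context" "")
        if ctx ≠ "" then g.modify kw [] (fun v => v ++ [ctx]) else g
      else g) grouped0
  grouped.items

-- ===== PORT B =====
-- B: for each kw in keywords, assign result[kw] := the list-comprehension over instances.
def build_keyword_contexts_py_alt (instances : List (List (String × String))) (keywords : List String) : List (String × List String) :=
  (keywords.foldl (fun d kw =>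
      d.insert kw (instances.filterMap (fun item =>
        if (PySem.Dict.mk item).getD "keyword" "" = kw then
          let c := PySem.Str.strip ((PySem.Dict.mk item).getD "context" "")
          if c ≠ "" then some c else none
        else none)))
    (PySem.Dict.empty : PySem.Dict String (List String))).items

-- ===== PRECONDITION & SPEC =====
def Spec_build_keyword_contexts_py (instances : List (List (String × String))) (keywords : List String) (out : List (String × List String)) : Prop := out = build_keyword_contexts_py_alt instances keywords
instance (instances : List (List (String × String))) (keywords : List String) (out : List (String × List String)) : Decidable (Spec_build_keyword_contexts_py instances keywords out) := by unfold Spec_build_keyword_contexts_py; infer_instance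

-- ===== CLAIM (what is proved, stated in full; the proofs are below) =====
def Claim_equal_build_keyword_contexts_py : Prop := ∀ (instances : List (List (String × String))) (keywords : List String), Dom_build_keyword_contexts_py instances keywords → Spec_build_keyword_contexts_py instances keywords (build_keyword_contexts_py instances keywords)

-- ===== LEMMAS AND PROOFS =====

-- the keyword and the stripped context of one instance, and the contexts a keyword collects
def pvKeyOf (item : List (String × String)) : String := (PySem.Dict.mk item).getD "keyword" ""
def pvCtxOf (item : List (String × String)) : String := PySem.Str.strip ((PySem.Dict.mk item).getD "context" "")
def pvCtxs (instances : List (List (String × String))) (k : String) : List String :=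
  instances.filterMap (fun item => if pvKeyOf item = k then (if pvCtxOf item ≠ "" then some (pvCtxOf item) else none) else none)

-- A's loop body, named for the proofs
def pvStep (g : PySem.Dict String (List String)) (item : List (String × String)) : PySem.Dict String (List String) :=
  if g.contains (pvKeyOf item) then
    (if pvCtxOf item ≠ "" then g.modify (pvKeyOf item) [] (fun v => v ++ [pvCtxOf item]) else g)
  else g

theorem pvStep_keys (instances : List (List (String × String))) :
    ∀ g : PySem.Dict String (List String), (instances.foldl pvStep g).keys = g.keys := by
  induction instances with
  | nil => intro g; rfl
  | cons item rest ih =>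
    intro g
    simp only [List.foldl_cons]
    rw [ih]
    unfold pvStep
    split_ifs with h1 h2
    · rw [PySem.Dict.keys_modify,
        PySem.Dict.keys_insert_of_contains _ _ (by rw [PySem.Dict.contains_eq_decide_mem_keys] at h1 ⊢; exact h1)]
    · rfl
    · rfl

theorem pvStep_getD (instances : List (List (String × String))) (k : String) :
    ∀ g : PySem.Dict String (List String),
      (instances.foldl pvStep g).getD k [] =
        g.getD k [] ++ (if g.contains k then pvCtxs instances k else []) := by
  induction instances with
  | nil => intro g; simp [pvCtxs]
  | cons item rest ih =>
    intro g
    simp only [List.foldl_cons]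
    by_cases hc : pvCtxOf item = ""
    · have hstep : pvStep g item = g := by unfold pvStep; simp [hc]
      rw [hstep, ih]
      have hctx : pvCtxs (item :: rest) k = pvCtxs rest k := by
        simp only [pvCtxs, List.filterMap_cons, hc]
        simp
      rw [hctx]
    · by_cases hkw : g.contains (pvKeyOf item) = true
      · have hstep : pvStep g item = g.modify (pvKeyOf item) [] (fun v => v ++ [pvCtxOf item]) := by
          unfold pvStep; simp [hc, hkw]
        rw [hstep, ih, PySem.Dict.contains_modify]
        by_cases hk : k = pvKeyOf item
        · subst hk
          rw [PySem.Dict.getD_modify_self]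
          simp only [BEq.rfl, Bool.true_or, if_pos hkw]
          have hctx2 : pvCtxs (item :: rest) (pvKeyOf item) = pvCtxOf item :: pvCtxs rest (pvKeyOf item) := by
            simp [pvCtxs, hc]
          rw [hctx2]
          simp
        · have hk' : k ≠ pvKeyOf item := hk
          rw [PySem.Dict.getD_modify_of_ne _ _ _ hk']
          have hbe : (k == pvKeyOf item) = false := by simp [hk]
          rw [hbe]
          simp only [Bool.false_or]
          have hctx : pvCtxs (item :: rest) k = pvCtxs rest k := by
            have hne : pvKeyOf item ≠ k := fun h => hk h.symm
            simp [pvCtxs, hne]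
          rw [hctx]
      · have hstep : pvStep g item = g := by unfold pvStep; simp [hkw]
        rw [hstep, ih]
        by_cases hgk : g.contains k = true
        · have hne : pvKeyOf item ≠ k := by
            intro h; rw [h] at hkw; exact hkw hgk
          have hctx : pvCtxs (item :: rest) k = pvCtxs rest k := by
            simp [pvCtxs, hne]
          rw [hctx]
        · simp [hgk]

-- a fold of inserts whose value depends only on the key: lookup afterwards
theorem pv_getD_foldl_insert (f : String → List String) (ks : List String) (k : String) :
    ∀ d : PySem.Dict String (List String),
      ((ks.foldl (fun d kw => d.insert kw (f kw)) d).getD k []) =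
        if k ∈ ks then f k else d.getD k [] := by
  induction ks with
  | nil => intro d; simp
  | cons a ks ih =>
    intro d
    simp only [List.foldl_cons]
    rw [ih]
    by_cases hks : k ∈ ks
    · simp [hks]
    · by_cases hka : k = a
      · subst hka; simp [hks]
      · simp [hks, hka, PySem.Dict.getD_insert, List.mem_cons]

theorem pv_contains_foldl_insert (f : String → List String) (ks : List String) (k : String) :
    ((ks.foldl (fun d kw => d.insert kw (f kw)) PySem.Dict.empty).contains k) = decide (k ∈ ks) := by
  rw [PySem.Dict.contains_eq_decide_mem_keys, PySem.Dict.keys_foldl_insert]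
  simp [PySem.Set.mem_update, PySem.Dict.keys_empty]

theorem pv_items_foldl_insert (f : String → List String) (ks : List String) :
    ((ks.foldl (fun d kw => d.insert kw (f kw)) PySem.Dict.empty).items) =
      (PySem.Set.ofList ks).map (fun k => (k, f k)) := by
  have hnd : ((ks.foldl (fun d kw => d.insert kw (f kw)) PySem.Dict.empty).keys).Nodup :=
    PySem.Dict.nodup_keys_foldl_insert ks (fun _ kw => f kw) PySem.Dict.empty (by simp)
  have hkeys : ((ks.foldl (fun d kw => d.insert kw (f kw)) PySem.Dict.empty).keys) = PySem.Set.ofList ks := by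
    rw [PySem.Dict.keys_foldl_insert]; simp [PySem.Dict.keys_empty]
    rfl
  rw [PySem.Dict.items_eq_map_keys _ hnd [], hkeys]
  apply List.map_congr_left
  intro k hk
  have hkmem : k ∈ ks := (PySem.Set.mem_ofList ks k).mp hk
  rw [pv_getD_foldl_insert f ks k PySem.Dict.empty, if_pos hkmem]

-- ===== VERDICT (by name: the statement is the Claim_ definition above) =====
theorem build_keyword_contexts_py_spec : Claim_equal_build_keyword_contexts_py := by
  intro instances keywords _
  unfold Spec_build_keyword_contexts_py build_keyword_contexts_py
  -- name the two dicts
  show (instances.foldl pvStep (keywords.foldl (fun d kw => d.insert kw ((fun _ => ([] : List String)) kw)) PySem.Dict.empty)).items = _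
  have hA_keys := pvStep_keys instances (keywords.foldl (fun d kw => d.insert kw ((fun _ => ([] : List String)) kw)) PySem.Dict.empty)
  have hnd0 : ((keywords.foldl (fun d kw => d.insert kw ((fun _ => ([] : List String)) kw)) PySem.Dict.empty).keys).Nodup :=
    PySem.Dict.nodup_keys_foldl_insert keywords _ PySem.Dict.empty (by simp)
  have hndA : ((instances.foldl pvStep (keywords.foldl (fun d kw => d.insert kw ((fun _ => ([] : List String)) kw)) PySem.Dict.empty)).keys).Nodup := by
    rw [hA_keys]; exact hnd0
  rw [PySem.Dict.items_eq_map_keys _ hndA [], hA_keys]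
  have hkeys0 : ((keywords.foldl (fun d kw => d.insert kw ((fun _ => ([] : List String)) kw)) PySem.Dict.empty).keys) = PySem.Set.ofList keywords := by
    rw [PySem.Dict.keys_foldl_insert]; simp [PySem.Dict.keys_empty]; rfl
  rw [hkeys0]
  have hB : build_keyword_contexts_py_alt instances keywords =
      ((keywords.foldl (fun d kw => d.insert kw (pvCtxs instances kw)) PySem.Dict.empty).items) := rfl
  rw [hB, pv_items_foldl_insert (fun k => pvCtxs instances k) keywords]
  apply List.map_congr_left
  intro k hk
  have hkmem : k ∈ keywords := (PySem.Set.mem_ofList keywords k).mp hk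
  rw [pvStep_getD instances k]
  rw [pv_getD_foldl_insert (fun _ => ([] : List String)) keywords k PySem.Dict.empty, if_pos hkmem]
  rw [pv_contains_foldl_insert (fun _ => ([] : List String)) keywords k]
  simp [hkmem]
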